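-- pv_equiv track=rewrite | github.com/radekrzepka/advent-of-code | day-3/main.py | findSameLetterThreeWords
-- ===== SOURCE A (Python) =====
-- def findSameLetterThreeWords(firstWord, secondWord, thirdWord):
--     firstWordLetters = []
--     for letter in firstWord:
--         if(letter not in firstWordLetters): firstWordLetters.append(letter)
--
--     firstAndSecondWordSameLetters = []
--     for letter in secondWord:
--         if(letter in firstWordLetters): firstAndSecondWordSameLetters.append(letter)
--
--     for letter in thirdWord:
--         if(letter in firstAndSecondWordSameLetters): return letter
-- ===== SOURCE B (Python) =====
-- def findSameLetterThreeWords(firstWord, secondWord, thirdWord):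
--     for letter in thirdWord:
--         if letter in firstWord and letter in secondWord:
--             return letter
-- ===== Notes on version B (the rewrite author's own statement) =====
-- stated objective: simpler
-- what changed: B drops A's two preprocessing passes (deduplicated letter list of the first word, then a filtered common-letter list) and instead scans the third word once, testing each character's membership directly in the two raw input strings, returning on the first hit.
import Mathlib
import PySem

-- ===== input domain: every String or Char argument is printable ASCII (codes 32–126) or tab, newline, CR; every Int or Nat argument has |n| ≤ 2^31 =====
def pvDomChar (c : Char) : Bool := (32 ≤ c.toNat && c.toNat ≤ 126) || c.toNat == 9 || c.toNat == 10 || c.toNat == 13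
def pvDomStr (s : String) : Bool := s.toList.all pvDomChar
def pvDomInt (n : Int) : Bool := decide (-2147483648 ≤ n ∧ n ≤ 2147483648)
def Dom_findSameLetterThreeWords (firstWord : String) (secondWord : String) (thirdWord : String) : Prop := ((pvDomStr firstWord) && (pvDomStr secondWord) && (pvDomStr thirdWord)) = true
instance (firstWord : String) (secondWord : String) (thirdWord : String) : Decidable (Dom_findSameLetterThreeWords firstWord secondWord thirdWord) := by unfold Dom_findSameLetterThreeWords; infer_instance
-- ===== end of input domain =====

-- ===== PORT A =====
-- B replaces A's two preprocessing passes by a single scan of thirdWord with direct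
-- membership tests in the raw strings; objective: simpler.
def findSameLetterThreeWords (firstWord : String) (secondWord : String) (thirdWord : String) : Option String :=
  let firstWordLetters :=
    firstWord.toList.foldl (fun acc letter => if letter ∈ acc then acc else acc ++ [letter]) []
  let firstAndSecondWordSameLetters :=
    secondWord.toList.foldl (fun acc letter => if letter ∈ firstWordLetters then acc ++ [letter] else acc) []
  (thirdWord.toList.find? (fun letter => letter ∈ firstAndSecondWordSameLetters)).map
    (fun letter => String.ofList [letter])

-- ===== PORT B =====
def findSameLetterThreeWords_alt (firstWord : String) (secondWord : String) (thirdWord : String) : Option String :=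
  (thirdWord.toList.find? (fun letter =>
      firstWord.toList.contains letter && secondWord.toList.contains letter)).map
    (fun letter => String.ofList [letter])

-- ===== PRECONDITION & SPEC =====
def Spec_findSameLetterThreeWords (firstWord : String) (secondWord : String) (thirdWord : String) (out : Option String) : Prop := out = findSameLetterThreeWords_alt firstWord secondWord thirdWord
instance (firstWord : String) (secondWord : String) (thirdWord : String) (out : Option String) : Decidable (Spec_findSameLetterThreeWords firstWord secondWord thirdWord out) := by unfold Spec_findSameLetterThreeWords; infer_instance

-- ===== CLAIM (what is proved, stated in full; the proofs are below) =====
def Claim_equal_findSameLetterThreeWords : Prop := ∀ (firstWord : String) (secondWord : String) (thirdWord : String), Dom_findSameLetterThreeWords firstWord secondWord thirdWord → Spec_findSameLetterThreeWords firstWord secondWord thirdWord (findSameLetterThreeWords firstWord secondWord thirdWord)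

-- ===== LEMMAS AND PROOFS =====

-- ===== VERDICT (by name: the statement is the Claim_ definition above) =====
lemma mem_dedup_fold (l : List Char) (acc : List Char) (c : Char) :
    c ∈ l.foldl (fun acc letter => if letter ∈ acc then acc else acc ++ [letter]) acc ↔
      c ∈ acc ∨ c ∈ l := by
  induction l generalizing acc with
  | nil => simp
  | cons h t ih =>
    simp only [List.foldl_cons]
    split_ifs with hh
    · rw [ih]
      simp only [List.mem_cons]
      constructor
      · tauto
      · rintro (h1 | (rfl | h1)) <;> tauto
    · rw [ih]
      simp only [List.mem_append, List.mem_cons]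
      tauto

lemma mem_filter_fold (fl : List Char) (l : List Char) (acc : List Char) (c : Char) :
    c ∈ l.foldl (fun acc letter => if letter ∈ fl then acc ++ [letter] else acc) acc ↔
      c ∈ acc ∨ (c ∈ l ∧ c ∈ fl) := by
  induction l generalizing acc with
  | nil => simp
  | cons h t ih =>
    simp only [List.foldl_cons]
    split_ifs with hh
    · rw [ih]
      simp only [List.mem_append, List.mem_cons]
      constructor
      · rintro ((h1 | h1) | h1)
        · tauto
        · simp only [List.not_mem_nil, or_false] at h1; subst h1; tauto
        · tauto
      · rintro (h1 | ⟨rfl | h1, h2⟩) <;> tauto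
    · rw [ih]
      simp only [List.mem_cons]
      constructor
      · rintro (h1 | h1) <;> tauto
      · rintro (h1 | ⟨rfl | h1, h2⟩) <;> tauto

lemma find?_congr' (l : List Char) (p q : Char → Bool) (h : ∀ c ∈ l, p c = q c) :
    l.find? p = l.find? q := by
  induction l with
  | nil => rfl
  | cons a t ih =>
    simp only [List.find?_cons]
    rw [h a (List.mem_cons_self)]
    split <;> first
      | rfl
      | exact ih (fun c hc => h c (List.mem_cons_of_mem _ hc))

theorem findSameLetterThreeWords_spec : Claim_equal_findSameLetterThreeWords := by
  intro f s t _
  unfold Spec_findSameLetterThreeWords findSameLetterThreeWords findSameLetterThreeWords_alt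
  simp only []
  congr 1
  apply find?_congr'
  intro c _
  have h1 := mem_filter_fold
    (f.toList.foldl (fun acc letter => if letter ∈ acc then acc else acc ++ [letter]) [])
    s.toList [] c
  have h2 := mem_dedup_fold f.toList [] c
  simp only [List.not_mem_nil, false_or] at h1 h2
  by_cases hc : c ∈ s.toList ∧ c ∈ f.toList
  · have : (decide (c ∈ s.toList.foldl (fun acc letter =>
        if letter ∈ f.toList.foldl (fun acc letter => if letter ∈ acc then acc else acc ++ [letter]) []
        then acc ++ [letter] else acc) [])) = true := by
      simp only [decide_eq_true_iff]; rw [h1, h2]; exact hc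
    simp_all
  · have : (decide (c ∈ s.toList.foldl (fun acc letter =>
        if letter ∈ f.toList.foldl (fun acc letter => if letter ∈ acc then acc else acc ++ [letter]) []
        then acc ++ [letter] else acc) [])) = false := by
      simp only [decide_eq_false_iff_not]; rw [h1, h2]; exact hc
    simp_all
    tauto
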